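-- pv_equiv track=rewrite | github.com/anonymousauthorname/ProjectGRID | src/baseline/non_llm_dual_gpu_inference.py | split_tasks_evenly
-- ===== SOURCE A (Python) =====
-- from typing import Callable, List, Sequence, TypeVar
--
-- T = TypeVar("T")
--
-- def split_tasks_evenly(tasks: Sequence[T], num_shards: int) -> List[List[T]]:
--     """Split tasks as evenly as possible to avoid long-tail imbalance."""
--     if num_shards <= 1 or not tasks:
--         return [list(tasks)]
--
--     total = len(tasks)
--     base = total // num_shards
--     remainder = total % num_shards
--     shards: List[List[T]] = []
--     start = 0
--     for shard_idx in range(num_shards):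
--         shard_size = base + (1 if shard_idx < remainder else 0)
--         end = start + shard_size
--         shards.append(list(tasks[start:end]))
--         start = end
--     return shards
-- ===== SOURCE B (Python) =====
-- from typing import List, Sequence, TypeVar
--
-- T = TypeVar("T")
--
-- def split_tasks_evenly(tasks: Sequence[T], num_shards: int) -> List[List[T]]:
--     """Split tasks as evenly as possible to avoid long-tail imbalance."""
--     if num_shards <= 1 or not tasks:
--         return [list(tasks)]
--     base, rem = divmod(len(tasks), num_shards)
--     shards: List[List[T]] = []
--     current: List[T] = []
--     cap = base + (1 if rem > 0 else 0)
--     for x in tasks: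
--         if cap == 0:
--             shards.append(current)
--             current = []
--             cap = base + (1 if len(shards) < rem else 0)
--         current.append(x)
--         cap -= 1
--     shards.append(current)
--     shards.extend([] for _ in range(num_shards - len(shards)))
--     return shards
-- ===== Notes on version B (the rewrite author's own statement) =====
-- stated objective: alternative
-- what changed: Instead of iterating over shard indices and slicing the task list at computed offsets, B makes a single pass over the elements themselves, maintaining the current shard and a remaining-capacity counter, starting a new shard when the counter hits zero and padding with empty shards at the end.
import Mathlib
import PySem

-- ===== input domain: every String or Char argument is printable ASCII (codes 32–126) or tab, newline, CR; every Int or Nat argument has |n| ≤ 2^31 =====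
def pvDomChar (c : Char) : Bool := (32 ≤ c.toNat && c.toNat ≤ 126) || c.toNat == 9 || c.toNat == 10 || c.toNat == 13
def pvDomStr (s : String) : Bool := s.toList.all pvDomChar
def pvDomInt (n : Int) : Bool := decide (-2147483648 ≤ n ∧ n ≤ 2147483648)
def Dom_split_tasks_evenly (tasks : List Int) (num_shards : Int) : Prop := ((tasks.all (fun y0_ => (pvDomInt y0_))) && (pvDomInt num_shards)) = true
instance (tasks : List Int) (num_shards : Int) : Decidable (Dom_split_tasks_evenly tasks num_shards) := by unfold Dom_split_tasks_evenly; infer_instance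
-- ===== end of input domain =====

-- B replaces A's loop over shard indices with slice offsets by a single pass over the
-- ELEMENTS, carrying the current shard and a remaining-capacity counter; objective: alternative.

-- ===== PORT A =====
def split_tasks_evenly (tasks : List Int) (num_shards : Int) : List (List Int) :=
  if num_shards ≤ 1 ∨ tasks = [] then [tasks]
  else
    let total : Int := tasks.length
    let base := PySem.Int.floordiv total num_shards
    let remainder := PySem.Int.mod total num_shards
    ((PySem.List.pyRange 0 num_shards 1).foldl
      (fun (st : List (List Int) × Int) shard_idx =>
        let shard_size := base + (if shard_idx < remainder then 1 else 0)
        let e := st.2 + shard_size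
        (st.1 ++ [PySem.List.slice tasks (some st.2) (some e)], e))
      ([], 0)).1

-- ===== PORT B =====
def split_tasks_evenly_alt (tasks : List Int) (num_shards : Int) : List (List Int) :=
  if num_shards ≤ 1 ∨ tasks = [] then [tasks]
  else
    let base := PySem.Int.floordiv tasks.length num_shards
    let rem := PySem.Int.mod tasks.length num_shards
    let st := tasks.foldl
      (fun (st : List (List Int) × List Int × Int) x =>
        let st2 :=
          if st.2.2 = 0 then
            (st.1 ++ [st.2.1], ([] : List Int),
             base + (if ((st.1.length : Int) + 1) < rem then 1 else 0))
          else st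
        (st2.1, st2.2.1 ++ [x], st2.2.2 - 1))
      ([], [], base + (if 0 < rem then 1 else 0))
    let shards := st.1 ++ [st.2.1]
    shards ++ List.replicate (num_shards - (shards.length : Int)).toNat []

-- ===== PRECONDITION & SPEC =====
def Spec_split_tasks_evenly (tasks : List Int) (num_shards : Int) (out : List (List Int)) : Prop := out = split_tasks_evenly_alt tasks num_shards
instance (tasks : List Int) (num_shards : Int) (out : List (List Int)) : Decidable (Spec_split_tasks_evenly tasks num_shards out) := by unfold Spec_split_tasks_evenly; infer_instance

-- ===== CLAIM (what is proved, stated in full; the proofs are below) =====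
def Claim_equal_split_tasks_evenly : Prop := ∀ (tasks : List Int) (num_shards : Int), Dom_split_tasks_evenly tasks num_shards → Spec_split_tasks_evenly tasks num_shards (split_tasks_evenly tasks num_shards)

-- ===== LEMMAS AND PROOFS =====

-- closed-form boundary of shard i (both programs' shards are the slices between these)
def pvBnd (base rem i : Int) : Int := i * base + min i rem

def pvG (tasks : List Int) (base rem i : Int) : List Int :=
  PySem.List.slice tasks (some (pvBnd base rem i)) (some (pvBnd base rem (i + 1)))

theorem pvBnd_succ (base rem i : Int) :
    pvBnd base rem (i + 1) = pvBnd base rem i + (base + if i < rem then 1 else 0) := by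
  unfold pvBnd
  by_cases h : i < rem
  · rw [min_eq_left (by omega), min_eq_left (by omega), if_pos h]; ring
  · rw [min_eq_right (by omega), min_eq_right (by omega), if_neg h]; ring

theorem pvBnd_zero (base rem : Int) (hr : 0 ≤ rem) : pvBnd base rem 0 = 0 := by
  unfold pvBnd; simp; omega

theorem pvBnd_mono (base rem : Int) (hb : 0 ≤ base) {i j : Int} (h : i ≤ j) :
    pvBnd base rem i ≤ pvBnd base rem j := by
  unfold pvBnd
  have h1 : i * base ≤ j * base := mul_le_mul_of_nonneg_right h hb
  have h2 : min i rem ≤ min j rem := by omega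
  linarith

theorem pvBnd_nonneg (base rem : Int) (hb : 0 ≤ base) (hr : 0 ≤ rem) {i : Int}
    (hi : 0 ≤ i) : 0 ≤ pvBnd base rem i := by
  calc (0:Int) = pvBnd base rem 0 := (pvBnd_zero base rem hr).symm
    _ ≤ pvBnd base rem i := pvBnd_mono base rem hb hi

-- A's fold: after processing indices 0..k-1, the accumulator holds the closed-form
-- slices and the carried start offset is the closed-form boundary.
theorem fold_inv (tasks : List Int) (base rem : Int) (hrem : 0 ≤ rem)
    (k : Int) (hk : 0 ≤ k) :
    (PySem.List.pyRange 0 k 1).foldl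
      (fun (st : List (List Int) × Int) i =>
        let sz := base + (if i < rem then 1 else 0)
        let e := st.2 + sz
        (st.1 ++ [PySem.List.slice tasks (some st.2) (some e)], e))
      ([], 0)
    = ((PySem.List.pyRange 0 k 1).map (pvG tasks base rem), pvBnd base rem k) := by
  induction k, hk using Int.le_induction with
  | base =>
      rw [PySem.List.pyRange_one_eq_nil (by omega)]
      simp [pvBnd]
      omega
  | succ k hk ih =>
      rw [PySem.List.pyRange_one_succ_right (by omega), List.foldl_append, List.map_append, ih]
      simp only [List.foldl_cons, List.foldl_nil, List.map_cons, List.map_nil, pvG]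
      rw [pvBnd_succ]

-- slice extension by one element
theorem slice_snoc (tasks : List Int) (a : Int) (ha : 0 ≤ a) (j : Nat)
    (haj : a ≤ (j : Int)) (hj : j < tasks.length) :
    PySem.List.slice tasks (some a) (some (j : Int)) ++ [tasks[j]]
      = PySem.List.slice tasks (some a) (some ((j : Int) + 1)) := by
  rw [PySem.List.slice_toNat tasks ha (by positivity),
      PySem.List.slice_toNat tasks ha (by positivity)]
  have hjn : ((j : Int)).toNat = j := by omega
  have hjn1 : (((j : Int)) + 1).toNat = j + 1 := by omega
  rw [hjn, hjn1]
  have hat : a.toNat ≤ j := by omega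
  rw [Nat.succ_sub hat, List.take_succ]
  congr 1
  have hlt : j - a.toNat < (tasks.drop a.toNat).length := by
    rw [List.length_drop]; omega
  rw [List.getElem?_eq_getElem hlt, List.getElem_drop]
  simp only [Option.toList_some]
  congr 2
  omega

theorem slice_refl_nil (tasks : List Int) (a : Int) (ha : 0 ≤ a) :
    PySem.List.slice tasks (some a) (some a) = [] := by
  rw [PySem.List.slice_toNat tasks ha ha]
  simp

-- B's fold invariant, phrased over the remaining suffix: from any consistent
-- mid-loop state, the postprocessed result is the closed-form shard list.
theorem alt_inv (tasks : List Int) (k base rem : Int) (hb : 0 ≤ base) (hr : 0 ≤ rem)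
    (hrk : rem < k) (heq : base * k + rem = tasks.length) :
    ∀ (m j : Nat) (cur : Int), tasks.length - j = m → j ≤ tasks.length →
      0 ≤ cur → cur < k → pvBnd base rem cur ≤ (j : Int) →
      (j : Int) ≤ pvBnd base rem (cur + 1) →
      (let st := (tasks.drop j).foldl
        (fun (st : List (List Int) × List Int × Int) x =>
          let st2 :=
            if st.2.2 = 0 then
              (st.1 ++ [st.2.1], ([] : List Int),
               base + (if ((st.1.length : Int) + 1) < rem then 1 else 0))
            else st
          (st2.1, st2.2.1 ++ [x], st2.2.2 - 1))
        ((PySem.List.pyRange 0 cur 1).map (pvG tasks base rem),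
         PySem.List.slice tasks (some (pvBnd base rem cur)) (some (j : Int)),
         pvBnd base rem (cur + 1) - j)
       let shards := st.1 ++ [st.2.1]
       shards ++ List.replicate ((k - (shards.length : Int)).toNat) [])
      = (PySem.List.pyRange 0 k 1).map (pvG tasks base rem) := by
  intro m
  induction m with
  | zero =>
      intro j cur hm hjle hc0 hck hlo hhi
      have hj : j = tasks.length := by omega
      have hbk : pvBnd base rem k = (tasks.length : Int) := by
        unfold pvBnd
        rw [min_eq_right (by omega)]
        linarith [mul_comm k base]
      subst hj
      rw [List.drop_length]
      simp only [List.foldl_nil]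
      -- the current shard equals the closed-form last slice (its end clamps to the length)
      have hb1 : 0 ≤ pvBnd base rem cur := pvBnd_nonneg base rem hb hr hc0
      have hcur : PySem.List.slice tasks (some (pvBnd base rem cur)) (some ((tasks.length : Nat) : Int))
          = pvG tasks base rem cur := by
        unfold pvG
        rw [PySem.List.slice_toNat tasks hb1 (by positivity),
            PySem.List.slice_toNat tasks hb1 (by linarith)]
        have hlen : (tasks.drop (pvBnd base rem cur).toNat).length
            = tasks.length - (pvBnd base rem cur).toNat := List.length_drop ..
        rw [List.take_of_length_le (by omega), List.take_of_length_le (by omega)]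
      rw [hcur]
      -- split the full range at cur+1; the tail shards are all empty
      have hsplit : PySem.List.pyRange 0 k 1
          = PySem.List.pyRange 0 (cur + 1) 1 ++ PySem.List.pyRange (cur + 1) k 1 :=
        PySem.List.pyRange_one_append 0 (cur + 1) k (by omega) (by omega)
      have htail : (PySem.List.pyRange (cur + 1) k 1).map (pvG tasks base rem)
          = List.replicate ((k - (cur + 1)).toNat) [] := by
        rw [List.eq_replicate_iff]
        constructor
        · rw [List.length_map, PySem.List.length_pyRange_one]
        · intro b hbmem
          rw [List.mem_map] at hbmem
          obtain ⟨i, hi, hgi⟩ := hbmem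
          rw [PySem.List.mem_pyRange_one] at hi
          have hge : (tasks.length : Int) ≤ pvBnd base rem i := by
            calc (tasks.length : Int) ≤ pvBnd base rem (cur + 1) := hhi
              _ ≤ pvBnd base rem i := pvBnd_mono base rem hb hi.1
          have h0i : 0 ≤ pvBnd base rem i := pvBnd_nonneg base rem hb hr (by omega)
          rw [← hgi]
          unfold pvG
          rw [PySem.List.slice_toNat tasks h0i
              (le_trans h0i (pvBnd_mono base rem hb (by omega)))]
          rw [List.drop_eq_nil_of_le (by omega), List.take_nil]
      rw [hsplit, List.map_append, htail,
          PySem.List.pyRange_one_succ_right (by omega), List.map_append]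
      simp only [List.map_cons, List.map_nil, List.append_assoc]
      congr 2
      congr 1
      rw [List.length_append, List.length_map, PySem.List.length_pyRange_one]
      simp
      omega
  | succ m ih =>
      intro j cur hm hjle hc0 hck hlo hhi
      have hjlt : j < tasks.length := by omega
      have hbc : 0 ≤ pvBnd base rem cur := pvBnd_nonneg base rem hb hr hc0
      rw [List.drop_eq_getElem_cons hjlt, List.foldl_cons]
      by_cases hc : (j : Int) = pvBnd base rem (cur + 1)
      · -- capacity exhausted: close shard cur, open shard cur+1
        have hlt : cur + 1 < k := by
          by_contra hge
          have hmono : pvBnd base rem k ≤ pvBnd base rem (cur + 1) :=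
            pvBnd_mono base rem hb (by omega)
          have hbk : pvBnd base rem k = (tasks.length : Int) := by
            unfold pvBnd
            rw [min_eq_right (by omega)]
            linarith [mul_comm k base]
          omega
        have hsz : 1 ≤ base + (if cur + 1 < rem then 1 else 0) := by
          by_cases h : cur + 1 < rem
          · rw [if_pos h]; omega
          · rw [if_neg h]
            by_contra hlt1
            have hb0 : base = 0 := by omega
            have hrn : rem = (tasks.length : Int) := by rw [hb0] at heq; linarith
            have hbv : pvBnd base rem (cur + 1) = min (cur + 1) rem := by
              unfold pvBnd; rw [hb0]; ring_nf
            omega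
        simp only
        rw [if_pos (show pvBnd base rem (cur + 1) - (j : Int) = 0 by omega)]
        simp only
        have h1 : ((PySem.List.pyRange 0 cur 1).map (pvG tasks base rem))
              ++ [PySem.List.slice tasks (some (pvBnd base rem cur)) (some (j : Int))]
            = (PySem.List.pyRange 0 (cur + 1) 1).map (pvG tasks base rem) := by
          rw [PySem.List.pyRange_one_succ_right (by omega), List.map_append]
          simp only [List.map_cons, List.map_nil]
          rw [hc]
          rfl
        have hlenmap : (((PySem.List.pyRange 0 cur 1).map (pvG tasks base rem)).length : Int) = cur := by
          rw [List.length_map, PySem.List.length_pyRange_one]; omega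
        have h2 : ([] : List Int) ++ [tasks[j]]
            = PySem.List.slice tasks (some (pvBnd base rem (cur + 1))) (some ((j : Int) + 1)) := by
          rw [← hc, List.nil_append,
              ← slice_snoc tasks (j : Int) (by positivity) j le_rfl hjlt,
              slice_refl_nil tasks _ (by positivity), List.nil_append]
        have h3 : base + (if ((((PySem.List.pyRange 0 cur 1).map (pvG tasks base rem)).length : Int) + 1) < rem then 1 else 0) - 1
            = pvBnd base rem (cur + 1 + 1) - ((j : Int) + 1) := by
          rw [hlenmap]
          have hstep := pvBnd_succ base rem (cur + 1)
          by_cases h : cur + 1 < rem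
          · rw [if_pos h]; rw [if_pos h] at hstep; omega
          · rw [if_neg h]; rw [if_neg h] at hstep; omega
        rw [h1, h2, h3]
        have hih := ih (j + 1) (cur + 1) (by omega) (by omega) (by omega) hlt
          (by push_cast; omega)
          (by push_cast
              have hstep := pvBnd_succ base rem (cur + 1)
              by_cases h : cur + 1 < rem
              · rw [if_pos h] at hstep; omega
              · rw [if_neg h] at hstep; omega)
        push_cast at hih
        exact hih
      · -- capacity remains: extend the current shard
        have hne : pvBnd base rem (cur + 1) - (j : Int) ≠ 0 := by omega
        simp only
        rw [if_neg hne]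
        simp only
        rw [slice_snoc tasks (pvBnd base rem cur) hbc j hlo hjlt]
        have h3 : pvBnd base rem (cur + 1) - (j : Int) - 1
            = pvBnd base rem (cur + 1) - ((j : Int) + 1) := by omega
        rw [h3]
        have hih := ih (j + 1) cur (by omega) (by omega) hc0 hck
          (by push_cast; omega) (by push_cast; omega)
        push_cast at hih
        exact hih

-- ===== VERDICT (by name: the statement is the Claim_ definition above) =====
theorem split_tasks_evenly_spec : Claim_equal_split_tasks_evenly := by
  intro tasks num_shards _
  unfold Spec_split_tasks_evenly split_tasks_evenly split_tasks_evenly_alt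
  split_ifs with h
  · rfl
  · push_neg at h
    have hpos : 0 < num_shards := by omega
    have hb : 0 ≤ PySem.Int.floordiv (tasks.length : Int) num_shards := by
      rw [PySem.Int.floordiv_eq_ediv_of_pos hpos]
      exact Int.ediv_nonneg (by positivity) (by omega)
    have hr : 0 ≤ PySem.Int.mod (tasks.length : Int) num_shards :=
      PySem.Int.mod_nonneg _ hpos
    have hrk : PySem.Int.mod (tasks.length : Int) num_shards < num_shards :=
      PySem.Int.mod_lt _ hpos
    have heq : PySem.Int.floordiv (tasks.length : Int) num_shards * num_shards
        + PySem.Int.mod (tasks.length : Int) num_shards = (tasks.length : Int) :=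
      PySem.Int.floordiv_mul_add_mod _ _
    dsimp only
    rw [fold_inv tasks _ _ hr num_shards (by omega)]
    have hinv := alt_inv tasks num_shards _ _ hb hr hrk heq tasks.length 0 0
      (by omega) (by omega) (by omega) (by omega)
      (by rw [pvBnd_zero _ _ hr]; simp)
      (by
        have := pvBnd_nonneg (PySem.Int.floordiv (tasks.length : Int) num_shards)
          (PySem.Int.mod (tasks.length : Int) num_shards) hb hr (show (0:Int) ≤ 0 + 1 by omega)
        simpa using this)
    simp only [Nat.cast_zero, List.drop_zero, zero_add, sub_zero,
      PySem.List.pyRange_one_eq_nil (le_refl (0:Int)), List.map_nil,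
      pvBnd_zero _ _ hr, slice_refl_nil tasks 0 le_rfl] at hinv
    have hb1 : pvBnd (PySem.Int.floordiv (tasks.length : Int) num_shards)
        (PySem.Int.mod (tasks.length : Int) num_shards) 1
        = PySem.Int.floordiv (tasks.length : Int) num_shards
          + (if 0 < PySem.Int.mod (tasks.length : Int) num_shards then 1 else 0) := by
      by_cases h0 : 0 < PySem.Int.mod (tasks.length : Int) num_shards
      · rw [if_pos h0]; unfold pvBnd; rw [min_eq_left (by omega)]; ring
      · rw [if_neg h0]; unfold pvBnd; rw [min_eq_right (by omega)]
        have h0' : PySem.Int.mod (tasks.length : Int) num_shards = 0 := by omega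
        rw [h0']; ring
    rw [hb1] at hinv
    exact hinv.symm
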